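-- pv_equiv track=rewrite | github.com/Thaising-Taing/YOLOv2Tiny-Simulation | src/Pre_Processing_Scratch/New/Pre_Processing.py | Break_FlipHex_256To32
-- ===== SOURCE A (Python) =====
-- def Flip_Data(Data_List):
--     Flip_Data_List = []
--     for i in range(0, len(Data_List), 8):
--         segment = Data_List[i:i + 8]
--         if len(segment) == 8:
--             reversed_segment = list(reversed(segment))
--             Flip_Data_List.extend(reversed_segment)
--     return Flip_Data_List
--
-- def Break_FlipHex_256To32(hex_strings, segment_length=8):
--     segmented_str = []
--     Hex32 = []
--     for hex_string in hex_strings: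
--         for value in hex_string:
--             segments = [value[i:i+segment_length] for i in range(0, len(value), segment_length)]
--             segmented_str.append(segments)
--     for segments in segmented_str:
--         for segment in segments:
--             Hex32.append(segment)
--     Flip_Data_List = Flip_Data(Hex32)
--     return Flip_Data_List
-- ===== SOURCE B (Python) =====
-- def Break_FlipHex_256To32(hex_strings, segment_length=8):
--     # Single streaming pass: no intermediate segment lists; a small buffer is
--     # flushed (reversed) into the result each time it reaches 8 segments, and a
--     # trailing partial group is simply never flushed.
--     result = []
--     buffer = []
--     for hex_string in hex_strings:
--         for value in hex_string:
--             for i in range(0, len(value), segment_length):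
--                 buffer.append(value[i:i+segment_length])
--                 if len(buffer) == 8:
--                     result.extend(reversed(buffer))
--                     buffer = []
--     return result
-- ===== Notes on version B (the rewrite author's own statement) =====
-- stated objective: alternative
-- what changed: A builds a list of per-value segment lists, flattens it into Hex32 in a second pass, then chunks Hex32 into 8s and reverses each full chunk; B is one streaming pass that keeps an 8-element buffer and flushes it reversed into the result whenever it fills, never flushing a trailing partial group, so both intermediate lists and the separate chunking pass disappear.
import Mathlib
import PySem

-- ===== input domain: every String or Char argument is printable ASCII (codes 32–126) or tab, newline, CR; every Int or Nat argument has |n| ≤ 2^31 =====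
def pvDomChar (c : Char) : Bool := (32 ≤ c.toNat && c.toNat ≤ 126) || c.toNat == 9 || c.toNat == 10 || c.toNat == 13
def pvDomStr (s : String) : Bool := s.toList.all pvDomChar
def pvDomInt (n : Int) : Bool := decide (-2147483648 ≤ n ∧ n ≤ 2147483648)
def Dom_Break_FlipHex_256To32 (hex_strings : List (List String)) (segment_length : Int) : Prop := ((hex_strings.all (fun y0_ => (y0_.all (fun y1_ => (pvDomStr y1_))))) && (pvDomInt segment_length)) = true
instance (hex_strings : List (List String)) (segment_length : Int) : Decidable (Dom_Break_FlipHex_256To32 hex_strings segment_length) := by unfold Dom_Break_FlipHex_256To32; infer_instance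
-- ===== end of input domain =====

-- B replaces A's three passes (segment lists, flatten, chunk-and-flip) by one streaming pass
-- with an 8-element buffer flushed in reverse; same return value wherever A returns.

-- ===== PORT A =====
def Flip_Data (Data_List : List String) : List String :=
  (PySem.List.pyRange 0 (PySem.List.len Data_List) 8).foldl
    (fun acc i =>
      if PySem.List.len (PySem.List.slice Data_List (some i) (some (i + 8))) == 8 then
        acc ++ (PySem.List.slice Data_List (some i) (some (i + 8))).reverse
      else acc) []

def Break_FlipHex_256To32 (hex_strings : List (List String)) (segment_length : Int) : List String :=
  Flip_Data
    ((hex_strings.foldl (fun acc hex_string =>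
        hex_string.foldl (fun acc2 value =>
          acc2 ++ [(PySem.List.pyRange 0 (PySem.Str.len value) segment_length).map
            (fun i => PySem.Str.slice value (some i) (some (i + segment_length)))]) acc) []).foldl
      (fun acc segments => segments.foldl (fun a s => a ++ [s]) acc) [])

-- ===== PORT B =====
def Break_FlipHex_256To32_alt (hex_strings : List (List String)) (segment_length : Int) : List String :=
  (hex_strings.foldl (fun st hex_string =>
    hex_string.foldl (fun st2 value =>
      (PySem.List.pyRange 0 (PySem.Str.len value) segment_length).foldl
        (fun (p : List String × List String) i =>
          if (p.2 ++ [PySem.Str.slice value (some i) (some (i + segment_length))]).length == 8 then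
            (p.1 ++ (p.2 ++ [PySem.Str.slice value (some i) (some (i + segment_length))]).reverse, [])
          else (p.1, p.2 ++ [PySem.Str.slice value (some i) (some (i + segment_length))])) st2) st)
    (([] : List String), ([] : List String))).1

-- ===== PRECONDITION & SPEC =====
-- Pre_ excludes only the inputs on which Python A raises: segment_length = 0 with at least
-- one value present makes range(0, len(value), 0) raise ValueError (B raises there too).
def Pre_Break_FlipHex_256To32 (hex_strings : List (List String)) (segment_length : Int) : Prop :=
  segment_length ≠ 0 ∨ hex_strings.all (fun hs => hs.isEmpty) = true
instance (hex_strings : List (List String)) (segment_length : Int) : Decidable (Pre_Break_FlipHex_256To32 hex_strings segment_length) := by unfold Pre_Break_FlipHex_256To32; infer_instance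

def pvWitness_Break_FlipHex_256To32 : List (List String) × Int := ([["0011223344556677"]], 8)

def Spec_Break_FlipHex_256To32 (hex_strings : List (List String)) (segment_length : Int) (out : List String) : Prop := out = Break_FlipHex_256To32_alt hex_strings segment_length
instance (hex_strings : List (List String)) (segment_length : Int) (out : List String) : Decidable (Spec_Break_FlipHex_256To32 hex_strings segment_length out) := by unfold Spec_Break_FlipHex_256To32; infer_instance

-- ===== CLAIM (what is proved, stated in full; the proofs are below) =====
def Claim_equal_Break_FlipHex_256To32 : Prop := ∀ (hex_strings : List (List String)) (segment_length : Int), Dom_Break_FlipHex_256To32 hex_strings segment_length → Pre_Break_FlipHex_256To32 hex_strings segment_length → Spec_Break_FlipHex_256To32 hex_strings segment_length (Break_FlipHex_256To32 hex_strings segment_length)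

-- ===== LEMMAS AND PROOFS =====

-- chunk-into-8-and-reverse: the common characterisation of both ports' output
def pvFD (l : List String) : List String :=
  if _h : 8 ≤ l.length then (l.take 8).reverse ++ pvFD (l.drop 8) else []
termination_by l.length
decreasing_by simp; omega

-- A's Flip_Data step
def pvAStep (full : List String) (acc : List String) (i : Int) : List String :=
  if PySem.List.len (PySem.List.slice full (some i) (some (i + 8))) == 8 then
    acc ++ (PySem.List.slice full (some i) (some (i + 8))).reverse
  else acc

-- B's buffer step
def pvBStep (p : List String × List String) (s : String) : List String × List String :=
  if (p.2 ++ [s]).length == 8 then (p.1 ++ (p.2 ++ [s]).reverse, []) else (p.1, p.2 ++ [s])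

theorem pvPyRange8_cons {a b : Int} (h : a < b) :
    PySem.List.pyRange a b 8 = a :: PySem.List.pyRange (a + 8) b 8 := by
  rw [PySem.List.pyRange_of_pos a b (by norm_num), PySem.List.pyRange_of_pos (a + 8) b (by norm_num)]
  have hN : (if a < b then ((b - a + 8 - 1) / 8).toNat else 0)
      = (if a + 8 < b then ((b - (a + 8) + 8 - 1) / 8).toNat else 0) + 1 := by
    split_ifs <;> omega
  rw [hN, List.range_succ_eq_map, List.map_cons, List.map_map]
  refine congrArg₂ _ (by push_cast; ring) ?_
  refine List.map_congr_left ?_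
  intro k _
  simp only [Function.comp_apply, Nat.succ_eq_add_one]
  push_cast
  ring

theorem pvPyRange8_nil {a b : Int} (h : b ≤ a) : PySem.List.pyRange a b 8 = [] := by
  rw [PySem.List.pyRange_of_pos a b (by norm_num), if_neg (by omega)]
  simp

theorem pvFlipA_gen (n : Nat) : ∀ (l pre acc : List String), l.length = n →
    (PySem.List.pyRange (pre.length : Int) ((pre.length : Int) + (l.length : Int)) 8).foldl
      (pvAStep (pre ++ l)) acc = acc ++ pvFD l := by
  induction n using Nat.strong_induction_on with
  | _ n IH =>
    intro l pre acc hn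
    by_cases hl : l.length = 0
    · have hnil : l = [] := List.eq_nil_of_length_eq_zero hl
      subst hnil
      simp only [List.length_nil, Nat.cast_zero, add_zero]
      rw [pvPyRange8_nil (le_refl _), List.foldl_nil, pvFD, dif_neg (by simp)]
      simp
    · have hlt : (pre.length : Int) < (pre.length : Int) + (l.length : Int) := by omega
      rw [pvPyRange8_cons hlt, List.foldl_cons]
      have hslice : PySem.List.slice (pre ++ l) (some (pre.length : Int))
          (some ((pre.length : Int) + 8)) = l.take 8 := by
        have h8 : ((pre.length : Int) + 8) = ((pre.length : Int) + ((8 : Nat) : Int)) := by norm_num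
        rw [h8, PySem.List.slice_natCast_add (pre ++ l) pre.length 8, List.drop_left]
      by_cases h8 : 8 ≤ l.length
      · have hcond : pvAStep (pre ++ l) acc (pre.length : Int) = acc ++ (l.take 8).reverse := by
          rw [pvAStep, hslice, if_pos]
          simp only [PySem.List.len_eq, List.length_take, beq_iff_eq]
          omega
        rw [hcond]
        have hlen : (pre ++ l.take 8).length = pre.length + 8 := by
          simp [List.length_take]
          omega
        have happ : (pre ++ l.take 8) ++ l.drop 8 = pre ++ l := by
          rw [List.append_assoc, List.take_append_drop]
        have hIH := IH (l.length - 8) (by omega) (l.drop 8) (pre ++ l.take 8)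
          (acc ++ (l.take 8).reverse) (by simp)
        rw [happ, hlen] at hIH
        have hcast : ((pre.length + 8 : Nat) : Int) = (pre.length : Int) + 8 := by push_cast; ring
        have hcast2 : ((pre.length + 8 : Nat) : Int) + ((l.drop 8).length : Int)
            = (pre.length : Int) + (l.length : Int) := by
          simp only [List.length_drop]
          omega
        rw [hcast2, hcast] at hIH
        rw [hIH]
        conv_rhs => rw [pvFD]
        rw [dif_pos h8, List.append_assoc]
      · have hcond : pvAStep (pre ++ l) acc (pre.length : Int) = acc := by
          rw [pvAStep, hslice, if_neg]
          simp only [PySem.List.len_eq, List.length_take, beq_iff_eq]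
          omega
        rw [hcond, pvPyRange8_nil (by omega), List.foldl_nil]
        conv_rhs => rw [pvFD]
        rw [dif_neg h8, List.append_nil]

theorem pvFlipData_eq (l : List String) : Flip_Data l = pvFD l := by
  rw [Flip_Data, PySem.List.len_eq]
  have hfun : (fun (acc : List String) (i : Int) =>
      if PySem.List.len (PySem.List.slice l (some i) (some (i + 8))) == 8 then
        acc ++ (PySem.List.slice l (some i) (some (i + 8))).reverse
      else acc) = pvAStep l := by
    funext acc i
    rw [pvAStep]
  rw [hfun]
  have h0 := pvFlipA_gen l.length l [] [] rfl
  simp only [List.nil_append, List.length_nil, Nat.cast_zero, zero_add] at h0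
  exact h0

theorem pvBFold_gen : ∀ (l res buf : List String), buf.length < 8 →
    (l.foldl pvBStep (res, buf)).1 = res ++ pvFD (buf ++ l) := by
  intro l
  induction l with
  | nil =>
    intro res buf hb
    simp only [List.foldl_nil, List.append_nil]
    rw [pvFD, dif_neg (by omega)]
    simp
  | cons s t ih =>
    intro res buf hb
    rw [List.foldl_cons]
    by_cases h8 : buf.length + 1 = 8
    · have hlen : (buf ++ [s]).length = 8 := by
        simp only [List.length_append, List.length_cons, List.length_nil]
        omega
      have hstep : pvBStep (res, buf) s = (res ++ (buf ++ [s]).reverse, []) := by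
        rw [pvBStep, if_pos (by simp only [hlen, beq_self_eq_true])]
      rw [hstep, ih (res ++ (buf ++ [s]).reverse) [] (by simp), List.nil_append]
      have hsplit : buf ++ s :: t = (buf ++ [s]) ++ t := by simp
      rw [hsplit]
      conv_rhs => rw [pvFD]
      rw [dif_pos (by simp only [List.length_append, hlen]; omega),
        List.take_left' hlen, List.drop_left' hlen, List.append_assoc]
    · have hstep : pvBStep (res, buf) s = (res, buf ++ [s]) := by
        rw [pvBStep, if_neg]
        simp only [List.length_append, List.length_cons, List.length_nil, beq_iff_eq]
        omega
      rw [hstep, ih res (buf ++ [s]) (by simp only [List.length_append,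
        List.length_cons, List.length_nil]; omega), List.append_assoc]
      simp

theorem pvFoldSing {α : Type} : ∀ (l acc : List α),
    l.foldl (fun a s => a ++ [s]) acc = acc ++ l := by
  intro l
  induction l with
  | nil => simp
  | cons x t ih => intro acc; rw [List.foldl_cons, ih, List.append_assoc]; rfl

theorem pvFoldSingMap {α β : Type} (g : α → List β) : ∀ (l : List α) (acc : List (List β)),
    l.foldl (fun a v => a ++ [g v]) acc = acc ++ l.map g := by
  intro l
  induction l with
  | nil => simp
  | cons x t ih => intro acc; rw [List.foldl_cons, ih, List.map_cons, List.append_assoc]; rfl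

-- A's first pass collects the per-value segment lists in order
theorem pvASeg {α β : Type} (segs : α → List β) : ∀ (L : List (List α)) (acc : List (List β)),
    L.foldl (fun acc hs => hs.foldl (fun a2 v => a2 ++ [segs v]) acc) acc
      = acc ++ L.flatMap (fun hs => hs.map segs) := by
  intro L
  induction L with
  | nil => simp
  | cons hs t ih =>
    intro acc
    rw [List.foldl_cons, pvFoldSingMap, ih, List.flatMap_cons, List.append_assoc]

-- A's second pass flattens them
theorem pvAFlat {β : Type} : ∀ (M : List (List β)) (acc : List β),
    M.foldl (fun acc ss => ss.foldl (fun a s => a ++ [s]) acc) acc = acc ++ M.flatten := by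
  intro M
  induction M with
  | nil => simp
  | cons ss t ih =>
    intro acc
    rw [List.foldl_cons, pvFoldSing, ih, List.flatten_cons, List.append_assoc]

theorem pvFlatSeg {α β : Type} (segs : α → List β) : ∀ (L : List (List α)),
    (L.flatMap (fun hs => hs.map segs)).flatten = L.flatMap (fun hs => hs.flatMap segs) := by
  intro L
  induction L with
  | nil => simp
  | cons hs t ih =>
    rw [List.flatMap_cons, List.flatMap_cons, List.flatten_append, ih,
      show hs.flatMap segs = (hs.map segs).flatten from by rw [List.flatMap_def]]

-- B's nested folds are one fold of pvBStep over the same stream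
theorem pvBInner (segs : String → List String) : ∀ (hs : List String)
    (st : List String × List String),
    hs.foldl (fun st2 v => (segs v).foldl pvBStep st2) st
      = (hs.flatMap segs).foldl pvBStep st := by
  intro hs
  induction hs with
  | nil => simp
  | cons v t ih => intro st; rw [List.foldl_cons, List.flatMap_cons, List.foldl_append, ih]

theorem pvBOuter (segs : String → List String) : ∀ (L : List (List String))
    (st : List String × List String),
    L.foldl (fun st hs => hs.foldl (fun st2 v => (segs v).foldl pvBStep st2) st) st
      = (L.flatMap (fun hs => hs.flatMap segs)).foldl pvBStep st := by
  intro L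
  induction L with
  | nil => simp
  | cons hs t ih =>
    intro st
    rw [List.foldl_cons, List.flatMap_cons, List.foldl_append, pvBInner, ih]

theorem pvMainEq (hex_strings : List (List String)) (segment_length : Int) :
    Break_FlipHex_256To32 hex_strings segment_length
      = Break_FlipHex_256To32_alt hex_strings segment_length := by
  rw [Break_FlipHex_256To32, Break_FlipHex_256To32_alt]
  rw [pvASeg (fun value => (PySem.List.pyRange 0 (PySem.Str.len value) segment_length).map
    (fun i => PySem.Str.slice value (some i) (some (i + segment_length))))]
  rw [List.nil_append, pvAFlat, List.nil_append, pvFlatSeg, pvFlipData_eq]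
  have hbs : ∀ (value : String) (st2 : List String × List String),
      (PySem.List.pyRange 0 (PySem.Str.len value) segment_length).foldl
        (fun (p : List String × List String) i =>
          if (p.2 ++ [PySem.Str.slice value (some i) (some (i + segment_length))]).length == 8 then
            (p.1 ++ (p.2 ++ [PySem.Str.slice value (some i) (some (i + segment_length))]).reverse, [])
          else (p.1, p.2 ++ [PySem.Str.slice value (some i) (some (i + segment_length))])) st2
      = ((PySem.List.pyRange 0 (PySem.Str.len value) segment_length).map
          (fun i => PySem.Str.slice value (some i) (some (i + segment_length)))).foldl
          pvBStep st2 := by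
    intro value st2
    rw [List.foldl_map]
    rfl
  simp only [hbs]
  rw [pvBOuter (fun value => (PySem.List.pyRange 0 (PySem.Str.len value) segment_length).map
    (fun i => PySem.Str.slice value (some i) (some (i + segment_length))))]
  rw [pvBFold_gen _ [] [] (by simp), List.nil_append, List.nil_append]

-- ===== VERDICT (by name: the statement is the Claim_ definition above) =====
theorem Break_FlipHex_256To32_spec : Claim_equal_Break_FlipHex_256To32 := by
  intro hex_strings segment_length _ _
  unfold Spec_Break_FlipHex_256To32
  exact pvMainEq hex_strings segment_length
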